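-- pv_equiv track=rewrite | github.com/Luke256/Ape-X | game.py | __compress
-- ===== SOURCE A (Python) =====
-- def __compress(row, direction):
--     new_row = []
--     zeroes = []
--     for value in row:
--         if value != 0:
--             new_row.append(value)
--         else:
--             zeroes.append(0)
--     if direction == 'left' or direction == 'up':
--         return new_row + zeroes
--     else:
--         return zeroes + new_row
-- ===== SOURCE B (Python) =====
-- def __compress(row, direction):
--     # One stable sort on a zero/nonzero boolean key instead of two accumulator lists.
--     if direction == 'left' or direction == 'up':
--         return sorted(row, key=lambda v: v == 0)
--     return sorted(row, key=lambda v: v != 0)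
-- ===== Notes on version B (the rewrite author's own statement) =====
-- stated objective: idiomatic
-- what changed: Replaces the two-accumulator partition loop by a single stable sort keyed on whether each value is zero (False<True keeps the nonzeros in order on the chosen side).
import Mathlib
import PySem

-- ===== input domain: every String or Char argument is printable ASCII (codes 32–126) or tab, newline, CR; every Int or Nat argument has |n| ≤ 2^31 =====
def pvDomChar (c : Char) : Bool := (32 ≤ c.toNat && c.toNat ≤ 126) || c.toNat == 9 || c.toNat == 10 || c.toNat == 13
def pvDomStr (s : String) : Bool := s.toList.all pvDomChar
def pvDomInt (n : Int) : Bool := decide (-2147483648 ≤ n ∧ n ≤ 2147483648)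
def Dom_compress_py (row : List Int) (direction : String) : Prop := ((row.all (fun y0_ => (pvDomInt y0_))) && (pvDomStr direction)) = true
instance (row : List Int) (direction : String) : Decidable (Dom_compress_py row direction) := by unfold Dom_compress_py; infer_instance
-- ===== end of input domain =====

-- B replaces A's two-accumulator partition loop by one stable sort on a zero/nonzero key (idiomatic, same result).


-- ===== PORT A =====
def compress_py (row : List Int) (direction : String) : List Int :=
  let st := row.foldl
    (fun (acc : List Int × List Int) value =>
      if value != 0 then (acc.1 ++ [value], acc.2) else (acc.1, acc.2 ++ [0]))
    ([], [])
  if direction == "left" || direction == "up" then st.1 ++ st.2 else st.2 ++ st.1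

-- ===== PORT B =====
-- Python's bool sort keys (False < True) are ported as the Ints 0 < 1.
def compress_py_alt (row : List Int) (direction : String) : List Int :=
  if direction == "left" || direction == "up" then
    PySem.List.sorted row (fun v => if v == 0 then (1 : Int) else 0) false
  else
    PySem.List.sorted row (fun v => if v != 0 then (1 : Int) else 0) false

-- ===== PRECONDITION & SPEC =====
def Spec_compress_py (row : List Int) (direction : String) (out : List Int) : Prop := out = compress_py_alt row direction
instance (row : List Int) (direction : String) (out : List Int) : Decidable (Spec_compress_py row direction out) := by unfold Spec_compress_py; infer_instance

-- ===== CLAIM (what is proved, stated in full; the proofs are below) =====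
def Claim_equal_compress_py : Prop := ∀ (row : List Int) (direction : String), Dom_compress_py row direction → Spec_compress_py row direction (compress_py row direction)

-- ===== LEMMAS AND PROOFS =====

-- Inserting a non-p element into (A ++ B) with all of A non-p and all of B p places it between them.
theorem insertBy_split (p : Int → Bool) (x : Int) (A B : List Int)
    (hA : ∀ y ∈ A, p y = false) (hB : ∀ y ∈ B, p y = true) (hx : p x = false) :
    PySem.List.insertBy
      (fun a b => decide ((if p a then (1 : Int) else 0) < (if p b then 1 else 0))) x (A ++ B)
      = A ++ x :: B := by
  induction A with
  | nil =>
    simp only [List.nil_append]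
    cases B with
    | nil => simp [PySem.List.insertBy]
    | cons z zs =>
      have hz := hB z (by simp)
      simp [PySem.List.insertBy, hx, hz]
  | cons a A ih =>
    have ha := hA a (by simp)
    simp only [List.cons_append, PySem.List.insertBy, hx, ha]
    simp [ih (fun y hy => hA y (by simp [hy]))]

-- Inserting a p element into (A ++ B) with every key ≤ 1 sends it to the end.
theorem insertBy_last (p : Int → Bool) (x : Int) (L : List Int) (hx : p x = true) :
    PySem.List.insertBy
      (fun a b => decide ((if p a then (1 : Int) else 0) < (if p b then 1 else 0))) x L
      = L ++ [x] := by
  apply PySem.List.insertBy_of_forall_not_before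
  intro y _
  by_cases hy : p y = true <;> simp [hx, hy]

-- Invariant of the stable insertion sort under a 0/1 key: it partitions, keeping order.
theorem sort_loop (p : Int → Bool) (xs A B : List Int)
    (hA : ∀ y ∈ A, p y = false) (hB : ∀ y ∈ B, p y = true) :
    List.foldl
      (fun acc x => PySem.List.insertBy
        (fun a b => decide ((if p a then (1 : Int) else 0) < (if p b then 1 else 0))) x acc)
      (A ++ B) xs
      = (A ++ xs.filter (fun v => !p v)) ++ (B ++ xs.filter p) := by
  induction xs generalizing A B with
  | nil => simp
  | cons x xs ih =>
    by_cases hx : p x = true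
    · have hB' : ∀ y ∈ B ++ [x], p y = true := by
        intro y hy
        rcases List.mem_append.1 hy with h | h
        · exact hB y h
        · simp at h; simpa [h] using hx
      rw [List.foldl_cons, insertBy_last p x (A ++ B) hx, List.append_assoc,
        ih A (B ++ [x]) hA hB']
      simp [hx]
    · have hx' : p x = false := by simpa using hx
      have hA' : ∀ y ∈ A ++ [x], p y = false := by
        intro y hy
        rcases List.mem_append.1 hy with h | h
        · exact hA y h
        · simp at h; simpa [h] using hx'
      rw [List.foldl_cons, insertBy_split p x A B hA hB hx',
        show A ++ x :: B = (A ++ [x]) ++ B by simp,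
        ih (A ++ [x]) B hA' hB]
      simp [hx']

theorem sorted_partition (p : Int → Bool) (xs : List Int) :
    PySem.List.sorted xs (fun v => if p v then (1 : Int) else 0) false
      = xs.filter (fun v => !p v) ++ xs.filter p := by
  have := sort_loop p xs [] [] (by simp) (by simp)
  simpa [PySem.List.sorted_eq_foldl_insertBy] using this

-- A's accumulating loop computes the two filters.
theorem a_loop (xs A B : List Int) :
    List.foldl
      (fun (acc : List Int × List Int) value =>
        if value != 0 then (acc.1 ++ [value], acc.2) else (acc.1, acc.2 ++ [0]))
      (A, B) xs
      = (A ++ xs.filter (fun v => v != 0), B ++ xs.filter (fun v => v == 0)) := by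
  induction xs generalizing A B with
  | nil => simp
  | cons x xs ih =>
    by_cases hx : x = 0
    · subst hx
      rw [List.foldl_cons, if_neg (by simp),
        show ((A, B).1, (A, B).2 ++ [(0 : Int)]) = (A, B ++ [0]) from rfl, ih A (B ++ [0])]
      simp
    · rw [List.foldl_cons, if_pos (by simp [hx]),
        show ((A, B).1 ++ [x], (A, B).2) = (A ++ [x], B) from rfl, ih (A ++ [x]) B]
      simp [hx]

-- ===== VERDICT (by name: the statement is the Claim_ definition above) =====
theorem compress_py_spec : Claim_equal_compress_py := by
  intro row direction _
  unfold Spec_compress_py compress_py compress_py_alt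
  rw [a_loop row [] []]
  by_cases hd : (direction == "left" || direction == "up") = true
  · simp only [hd, if_true]
    rw [sorted_partition (fun v => v == 0) row]
    have h1 : row.filter (fun v => !(v == 0)) = row.filter (fun v => v != 0) := by
      apply List.filter_congr; intro v _; simp [bne]
    simp [h1]
  · simp only [hd]
    rw [sorted_partition (fun v => v != 0) row]
    have h1 : row.filter (fun v => !(v != 0)) = row.filter (fun v => v == 0) := by
      apply List.filter_congr; intro v _; simp [bne]
    simp [h1]
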